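-- pv_equiv track=rewrite | github.com/gHashTag/vibee-lang | research/trinity_string.py | compare_3way
-- ===== SOURCE A (Python) =====
-- def compare_3way(s1: str, s2: str) -> int:
--     """
--     3-way string comparison
--     Returns: -1 if s1 < s2, 0 if s1 == s2, 1 if s1 > s2
--     """
--     min_len = min(len(s1), len(s2))
--
--     for i in range(min_len):
--         if s1[i] < s2[i]:
--             return -1
--         if s1[i] > s2[i]:
--             return 1
--
--     if len(s1) < len(s2):
--         return -1
--     if len(s1) > len(s2):
--         return 1
--     return 0
-- ===== SOURCE B (Python) =====
-- def compare_3way(s1: str, s2: str) -> int: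
--     """3-way string comparison via Python's built-in lexicographic ordering."""
--     return (s1 > s2) - (s1 < s2)
-- ===== Notes on version B (the rewrite author's own statement) =====
-- stated objective: idiomatic
-- what changed: Replaced the manual character loop plus length comparison with the standard sign idiom (s1 > s2) - (s1 < s2) delegating to Python's built-in C-level lexicographic string comparison.
import Mathlib
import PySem

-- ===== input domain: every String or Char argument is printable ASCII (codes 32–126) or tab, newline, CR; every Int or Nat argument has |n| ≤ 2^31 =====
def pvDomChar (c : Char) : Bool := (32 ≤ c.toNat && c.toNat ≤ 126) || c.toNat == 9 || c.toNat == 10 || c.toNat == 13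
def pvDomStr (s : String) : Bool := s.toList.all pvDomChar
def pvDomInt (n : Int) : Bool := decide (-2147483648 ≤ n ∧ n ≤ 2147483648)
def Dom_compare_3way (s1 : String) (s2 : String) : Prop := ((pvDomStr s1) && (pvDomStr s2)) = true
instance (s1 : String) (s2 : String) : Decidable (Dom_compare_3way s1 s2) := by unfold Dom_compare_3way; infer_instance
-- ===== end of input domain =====

-- B replaces A's explicit character loop and length tie-break with the idiomatic
-- sign pattern (s1 > s2) - (s1 < s2) over Python's built-in lexicographic ordering.

-- ===== PORT A =====
-- A's loop over range(min_len) with post-loop length comparison: the simultaneous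
-- structural recursion consumes both strings in step; an empty side is exactly the
-- post-loop case where the lengths decide (both prefixes of length min_len are consumed).
def compare3wayLoopA : List Char → List Char → Int
  | [], [] => 0
  | [], _ :: _ => -1
  | _ :: _, [] => 1
  | c1 :: t1, c2 :: t2 =>
    if c1 < c2 then -1 else if c2 < c1 then 1 else compare3wayLoopA t1 t2

def compare_3way (s1 : String) (s2 : String) : Int :=
  compare3wayLoopA s1.toList s2.toList

-- ===== PORT B =====
-- Python's built-in string < / > is lexicographic on code points = the List Char
-- lexicographic order on toList (Lean's String.< is not kernel-reducible, so the
-- comparison is taken on toList, which is exact for Python's ordering).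
def compare_3way_alt (s1 : String) (s2 : String) : Int :=
  (if s2.toList < s1.toList then (1 : Int) else 0) -
  (if s1.toList < s2.toList then (1 : Int) else 0)

-- ===== PRECONDITION & SPEC =====
def Spec_compare_3way (s1 : String) (s2 : String) (out : Int) : Prop := out = compare_3way_alt s1 s2
instance (s1 : String) (s2 : String) (out : Int) : Decidable (Spec_compare_3way s1 s2 out) := by unfold Spec_compare_3way; infer_instance

-- ===== CLAIM (what is proved, stated in full; the proofs are below) =====
def Claim_equal_compare_3way : Prop := ∀ (s1 : String) (s2 : String), Dom_compare_3way s1 s2 → Spec_compare_3way s1 s2 (compare_3way s1 s2)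

-- ===== LEMMAS AND PROOFS =====
theorem compare3wayLoopA_eq_sign (l1 l2 : List Char) :
    compare3wayLoopA l1 l2 =
      (if l2 < l1 then (1 : Int) else 0) - (if l1 < l2 then (1 : Int) else 0) := by
  induction l1 generalizing l2 with
  | nil => cases l2 <;> simp [compare3wayLoopA, List.nil_lt_cons]
  | cons c1 t1 ih =>
    cases l2 with
    | nil => simp [compare3wayLoopA, List.nil_lt_cons]
    | cons c2 t2 =>
      by_cases h1 : c1 < c2
      · simp [compare3wayLoopA, h1, List.cons_lt_cons_iff, lt_asymm h1, (ne_of_lt h1).symm]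
      · by_cases h2 : c2 < c1
        · simp [compare3wayLoopA, h1, h2, List.cons_lt_cons_iff, (ne_of_lt h2).symm]
        · have he : c1 = c2 := le_antisymm (not_lt.mp h2) (not_lt.mp h1)
          subst he
          simp [compare3wayLoopA, ih t2]

-- ===== VERDICT (by name: the statement is the Claim_ definition above) =====
theorem compare_3way_spec : Claim_equal_compare_3way := by
  intro s1 s2 _
  unfold Spec_compare_3way compare_3way compare_3way_alt
  exact compare3wayLoopA_eq_sign s1.toList s2.toList
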